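-- pv_equiv track=rewrite | github.com/nymph-ai/minecraft-assets | scripts/build_version.py | pick_texture
-- ===== SOURCE A (Python) =====
-- def pick_texture(textures):
--     if not textures:
--         return None
--     for key in ("all", "texture", "side", "end", "top", "bottom", "layer0", "particle"):
--         if key in textures and isinstance(textures[key], str):
--             return textures[key]
--     for key in sorted(textures.keys()):
--         value = textures[key]
--         if isinstance(value, str):
--             return value
--     return None
-- ===== SOURCE B (Python) =====
-- PRIORITY = ("all", "texture", "side", "end", "top", "bottom", "layer0", "particle")
--
--
-- def pick_texture(textures):
--     # Single linear pass: keep the string-valued entry whose (priority rank, key)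
--     # pair is lexicographically smallest; no sort, no per-key membership probes.
--     best = None  # (rank, key, value)
--     for k, v in textures.items():
--         if isinstance(v, str):
--             r = PRIORITY.index(k) if k in PRIORITY else len(PRIORITY)
--             if best is None or (r, k) < (best[0], best[1]):
--                 best = (r, k, v)
--     return None if best is None else best[2]
-- ===== Notes on version B (the rewrite author's own statement) =====
-- stated objective: alternative
-- what changed: Replaced the two-phase scheme (8 membership probes, then sorting all keys and scanning) by one linear pass over the items that tracks the entry minimal under the lexicographic key (priority-rank, key).
import Mathlib
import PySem

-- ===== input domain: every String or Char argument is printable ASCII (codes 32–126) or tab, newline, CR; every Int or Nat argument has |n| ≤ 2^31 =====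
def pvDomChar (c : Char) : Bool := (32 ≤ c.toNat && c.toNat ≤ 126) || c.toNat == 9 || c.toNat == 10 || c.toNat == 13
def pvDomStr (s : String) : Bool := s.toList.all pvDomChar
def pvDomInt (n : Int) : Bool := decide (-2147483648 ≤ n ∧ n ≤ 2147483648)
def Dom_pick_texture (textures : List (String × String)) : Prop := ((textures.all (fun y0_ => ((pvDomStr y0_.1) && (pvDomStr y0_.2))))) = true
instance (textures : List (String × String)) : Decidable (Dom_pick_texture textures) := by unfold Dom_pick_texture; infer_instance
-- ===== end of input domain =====

-- B replaces A's two-phase scheme (8 membership probes, then sort-all-keys-and-scan) by one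
-- linear pass tracking the entry minimal under the lexicographic pair (priority rank, key).

-- the 8 priority keys of A's first loop
def pvPriority : List String := ["all", "texture", "side", "end", "top", "bottom", "layer0", "particle"]

-- dict lookup under the type convention: first match in the association list
def pvLookup (d : List (String × String)) (k : String) : Option String :=
  (d.find? (fun p => p.1 == k)).map Prod.snd

-- ===== PORT A =====
-- phase 1: 'for key in (...): if key in textures and isinstance(textures[key], str): return textures[key]'
-- (values are str by the type convention, so the isinstance test is always true)
def pickPhase1 (d : List (String × String)) : List String → Option String
  | [] => none
  | k :: ks => if (pvLookup d k).isSome then pvLookup d k else pickPhase1 d ks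

-- phase 2: 'for key in sorted(textures.keys()): value = textures[key]; if isinstance(value, str): return value'
def pickPhase2 (d : List (String × String)) : List String → Option String
  | [] => none
  | k :: ks =>
    match pvLookup d k with
    | some v => some v
    | none => pickPhase2 d ks

def pick_texture (textures : List (String × String)) : Option String :=
  if textures = [] then none
  else
    match pickPhase1 textures pvPriority with
    | some v => some v
    | none =>
      pickPhase2 textures (PySem.List.sorted (PySem.List.dedup (textures.map Prod.fst)) (fun x => x) false)

-- ===== PORT B =====
-- 'PRIORITY.index(k) if k in PRIORITY else len(PRIORITY)' (= List.idxOf)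
def pvRank (k : String) : Nat := pvPriority.idxOf k

-- the loop body: keep the entry whose (rank, key) is lexicographically smallest so far
def pvStep (best : Option (Nat × String × String)) (p : String × String) : Option (Nat × String × String) :=
  match best with
  | none => some (pvRank p.1, p.1, p.2)
  | some (r, k, v) =>
    let r' := pvRank p.1
    if r' < r ∨ (r' = r ∧ p.1 < k) then some (r', p.1, p.2) else some (r, k, v)

def pick_texture_alt (textures : List (String × String)) : Option String :=
  match textures.foldl pvStep none with
  | some (_, _, v) => some v
  | none => none

-- ===== PRECONDITION & SPEC =====
def Spec_pick_texture (textures : List (String × String)) (out : Option String) : Prop := out = pick_texture_alt textures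
instance (textures : List (String × String)) (out : Option String) : Decidable (Spec_pick_texture textures out) := by unfold Spec_pick_texture; infer_instance

-- ===== CLAIM (what is proved, stated in full; the proofs are below) =====
def Claim_equal_pick_texture : Prop := ∀ (textures : List (String × String)), Dom_pick_texture textures → Spec_pick_texture textures (pick_texture textures)

-- ===== LEMMAS AND PROOFS =====

-- strict lexicographic order on keys by (rank, key)
def keyLt (a b : String) : Prop := pvRank a < pvRank b ∨ (pvRank a = pvRank b ∧ a < b)

theorem keyLt_irrefl (a : String) : ¬ keyLt a a := by
  simp [keyLt]

theorem keyLt_trans {a b c : String} (h1 : keyLt a b) (h2 : keyLt b c) : keyLt a c := by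
  rcases h1 with h1 | ⟨h1, h1'⟩ <;> rcases h2 with h2 | ⟨h2, h2'⟩
  · exact Or.inl (h1.trans h2)
  · exact Or.inl (h2 ▸ h1)
  · exact Or.inl (h1 ▸ h2)
  · exact Or.inr ⟨h1.trans h2, lt_trans h1' h2'⟩

theorem keyLt_total {a b : String} (h : a ≠ b) : keyLt a b ∨ keyLt b a := by
  rcases Nat.lt_trichotomy (pvRank a) (pvRank b) with hr | hr | hr
  · exact Or.inl (Or.inl hr)
  · rcases lt_or_gt_of_ne h with hs | hs
    · exact Or.inl (Or.inr ⟨hr, hs⟩)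
    · exact Or.inr (Or.inr ⟨hr.symm, hs⟩)
  · exact Or.inr (Or.inl hr)

-- reference recursion shadowing B's fold
def bestFrom (k0 v0 : String) : List (String × String) → String × String
  | [] => (k0, v0)
  | (k, v) :: t => if pvRank k < pvRank k0 ∨ (pvRank k = pvRank k0 ∧ k < k0) then bestFrom k v t else bestFrom k0 v0 t

theorem bestFrom_cons_pos {k0 v0 k v : String} {t : List (String × String)} (h : keyLt k k0) :
    bestFrom k0 v0 ((k, v) :: t) = bestFrom k v t := by
  simp only [bestFrom, keyLt] at h ⊢; rw [if_pos h]

theorem bestFrom_cons_neg {k0 v0 k v : String} {t : List (String × String)} (h : ¬ keyLt k k0) :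
    bestFrom k0 v0 ((k, v) :: t) = bestFrom k0 v0 t := by
  simp only [bestFrom, keyLt] at h ⊢; rw [if_neg h]

theorem foldl_pvStep_eq (t : List (String × String)) : ∀ (k0 v0 : String),
    t.foldl pvStep (some (pvRank k0, k0, v0)) =
      some (pvRank (bestFrom k0 v0 t).1, (bestFrom k0 v0 t).1, (bestFrom k0 v0 t).2) := by
  induction t with
  | nil => intro k0 v0; simp [bestFrom]
  | cons p t ih =>
    intro k0 v0
    obtain ⟨k, v⟩ := p
    by_cases h : keyLt k k0
    · rw [bestFrom_cons_pos h, List.foldl_cons,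
        show pvStep (some (pvRank k0, k0, v0)) (k, v) = some (pvRank k, k, v) from by
          simp only [pvStep, keyLt] at h ⊢; rw [if_pos h],
        ih k v]
    · rw [bestFrom_cons_neg h, List.foldl_cons,
        show pvStep (some (pvRank k0, k0, v0)) (k, v) = some (pvRank k0, k0, v0) from by
          simp only [pvStep, keyLt] at h ⊢; rw [if_neg h],
        ih k0 v0]

theorem alt_eq (k0 v0 : String) (t : List (String × String)) :
    pick_texture_alt ((k0, v0) :: t) = some (bestFrom k0 v0 t).2 := by
  simp only [pick_texture_alt, List.foldl_cons, pvStep]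
  rw [foldl_pvStep_eq]

theorem best_min (t : List (String × String)) : ∀ (k0 v0 : String),
    ∀ k' ∈ k0 :: t.map Prod.fst, ¬ keyLt k' (bestFrom k0 v0 t).1 := by
  induction t with
  | nil =>
    intro k0 v0 k' hk'
    simp only [List.map_nil, List.mem_cons, List.not_mem_nil, or_false] at hk'
    rw [hk']
    exact keyLt_irrefl k0
  | cons p t ih =>
    intro k0 v0 k' hk'
    obtain ⟨k, v⟩ := p
    simp only [List.map_cons, List.mem_cons] at hk'
    by_cases h : keyLt k k0
    · rw [bestFrom_cons_pos h]
      rcases hk' with h0 | h0 | hk'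
      · rw [h0]
        intro hc
        have hnk : ¬ keyLt k (bestFrom k v t).1 := ih k v k (by simp)
        have hlt : keyLt (bestFrom k v t).1 k0 := by
          rcases eq_or_ne (bestFrom k v t).1 k with he | hne
          · rw [he]; exact h
          · rcases keyLt_total hne with hl | hl
            · exact keyLt_trans hl h
            · exact absurd hl hnk
        exact keyLt_irrefl _ (keyLt_trans hc hlt)
      · rw [h0]
        exact ih k v k (by simp)
      · exact ih k v k' (by simp [hk'])
    · rw [bestFrom_cons_neg h]
      rcases hk' with h0 | h0 | hk'
      · rw [h0]
        exact ih k0 v0 k0 (by simp)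
      · rw [h0]
        intro hc
        rcases eq_or_ne (bestFrom k0 v0 t).1 k0 with he | hne
        · rw [he] at hc; exact h hc
        · rcases keyLt_total hne with hl | hl
          · exact h (keyLt_trans hc hl)
          · exact (ih k0 v0 k0 (by simp)) hl
      · exact ih k0 v0 k' (by simp [hk'])

-- the chosen key never got worse than the initial one
theorem best_le (t : List (String × String)) (k0 v0 : String) :
    (bestFrom k0 v0 t).1 = k0 ∨ keyLt (bestFrom k0 v0 t).1 k0 := by
  rcases eq_or_ne (bestFrom k0 v0 t).1 k0 with he | hne
  · exact Or.inl he
  · rcases keyLt_total hne with hl | hl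
    · exact Or.inr hl
    · exact absurd hl (best_min t k0 v0 k0 (by simp))

theorem best_mem (t : List (String × String)) : ∀ (k0 v0 : String),
    (bestFrom k0 v0 t).1 ∈ k0 :: t.map Prod.fst := by
  induction t with
  | nil => intro k0 v0; simp [bestFrom]
  | cons p t ih =>
    intro k0 v0
    obtain ⟨k, v⟩ := p
    by_cases h : keyLt k k0
    · rw [bestFrom_cons_pos h]
      have := ih k v
      simp only [List.map_cons, List.mem_cons] at this ⊢
      tauto
    · rw [bestFrom_cons_neg h]
      have := ih k0 v0
      simp only [List.map_cons, List.mem_cons] at this ⊢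
      tauto

theorem lookup_cons (a b x : String) (d : List (String × String)) :
    pvLookup ((a, b) :: d) x = if a = x then some b else pvLookup d x := by
  by_cases h : a = x <;> simp [pvLookup, h]

-- the value kept with the chosen key is its FIRST-match value in the whole list
theorem best_lookup (t : List (String × String)) : ∀ (k0 v0 : String),
    pvLookup ((k0, v0) :: t) (bestFrom k0 v0 t).1 = some (bestFrom k0 v0 t).2 := by
  induction t with
  | nil => intro k0 v0; simp [bestFrom, lookup_cons]
  | cons p t ih =>
    intro k0 v0
    obtain ⟨k, v⟩ := p
    by_cases h : keyLt k k0
    · rw [bestFrom_cons_pos h]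
      have hne : k0 ≠ (bestFrom k v t).1 := by
        intro he
        rcases best_le t k v with he2 | hl
        · rw [← he] at he2; exact keyLt_irrefl k0 (he2 ▸ h)
        · rw [← he] at hl; exact keyLt_irrefl k0 (keyLt_trans hl h)
      rw [lookup_cons, if_neg hne]
      exact ih k v
    · rw [bestFrom_cons_neg h]
      have hIH := ih k0 v0
      rw [lookup_cons] at hIH
      rw [lookup_cons]
      by_cases he : k0 = (bestFrom k0 v0 t).1
      · rw [if_pos he] at hIH ⊢; exact hIH
      · rw [if_neg he] at hIH ⊢
        rw [lookup_cons]
        have hne : k ≠ (bestFrom k0 v0 t).1 := by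
          intro hk
          rcases best_le t k0 v0 with he2 | hl
          · exact he he2.symm
          · exact h (hk ▸ hl)
        rw [if_neg hne]
        exact hIH

theorem lookup_isSome_iff (d : List (String × String)) (k : String) :
    (pvLookup d k).isSome = true ↔ k ∈ d.map Prod.fst := by
  simp [pvLookup, List.find?_isSome]

theorem phase1_eq (d : List (String × String)) (ks : List String) :
    pickPhase1 d ks = match ks.find? (fun k => (pvLookup d k).isSome) with
      | some k => pvLookup d k
      | none => none := by
  induction ks with
  | nil => simp [pickPhase1]
  | cons k ks ih =>
    by_cases h : (pvLookup d k).isSome <;> simp [pickPhase1, h, ih]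

theorem rank_lt_of_mem {k : String} (h : k ∈ pvPriority) : pvRank k < 8 :=
  List.idxOf_lt_length_of_mem h

theorem rank_eq_of_notMem {k : String} (h : k ∉ pvPriority) : pvRank k = 8 :=
  List.idxOf_of_notMem h

theorem mem_of_rank_lt {k : String} (h : pvRank k < 8) : k ∈ pvPriority := by
  by_contra hm
  rw [rank_eq_of_notMem hm] at h
  omega

-- A's result is the first-match lookup of some key of d minimal under keyLt
theorem A_min (k0 v0 : String) (t : List (String × String)) :
    ∃ m, pick_texture ((k0, v0) :: t) = pvLookup ((k0, v0) :: t) m ∧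
      m ∈ ((k0, v0) :: t).map Prod.fst ∧
      ∀ k ∈ ((k0, v0) :: t).map Prod.fst, ¬ keyLt k m := by
  have hd : ((k0, v0) :: t : List (String × String)) ≠ [] := List.cons_ne_nil _ _
  unfold pick_texture
  rw [if_neg hd, phase1_eq]
  cases hf : pvPriority.find? (fun k => (pvLookup ((k0, v0) :: t) k).isSome) with
  | some k1 =>
    have hp : (pvLookup ((k0, v0) :: t) k1).isSome = true := by
      simpa using List.find?_some hf
    obtain ⟨v1, hv1⟩ := Option.isSome_iff_exists.mp hp
    have hk1mem : k1 ∈ pvPriority := List.mem_of_find?_eq_some hf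
    refine ⟨k1, by simp [hv1], (lookup_isSome_iff _ _).mp hp, ?_⟩
    intro k hk hc
    have hkp : (pvLookup ((k0, v0) :: t) k).isSome = true := (lookup_isSome_iff _ _).mpr hk
    have hr1 : pvRank k1 < 8 := rank_lt_of_mem hk1mem
    obtain ⟨hpred, as, bs, hsplit, hpre⟩ := List.find?_eq_some_iff_append.mp hf
    have hk1as : k1 ∉ as := fun hmem => by simpa [hp] using hpre k1 hmem
    have hrank1 : pvRank k1 = as.length := by
      rw [pvRank, hsplit, List.idxOf_append_of_notMem hk1as, List.idxOf_cons_self]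
      omega
    rcases hc with hlt | ⟨heq, hs⟩
    · have hkmem : k ∈ pvPriority := mem_of_rank_lt (lt_trans hlt hr1)
      have hkas : k ∉ as := fun hmem => by simpa [hkp] using hpre k hmem
      have : pvRank k ≥ as.length := by
        rw [pvRank, hsplit, List.idxOf_append_of_notMem hkas]
        omega
      omega
    · have hkmem : k ∈ pvPriority := mem_of_rank_lt (heq ▸ hr1)
      have : k = k1 := (List.idxOf_inj hkmem).mp heq
      subst this
      exact absurd hs (lt_irrefl k)
  | none =>
    have hnp : ∀ k ∈ pvPriority, ¬ (pvLookup ((k0, v0) :: t) k).isSome = true := by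
      intro k hk
      simpa using List.find?_eq_none.mp hf k hk
    have hrank : ∀ k ∈ ((k0, v0) :: t).map Prod.fst, pvRank k = 8 := by
      intro k hk
      exact rank_eq_of_notMem (fun hm => hnp k hm ((lookup_isSome_iff _ _).mpr hk))
    have hk0d : k0 ∈ PySem.List.dedup (((k0, v0) :: t).map Prod.fst) :=
      (PySem.List.mem_dedup _ _).mpr (by simp)
    cases hS : PySem.List.sorted (PySem.List.dedup (((k0, v0) :: t).map Prod.fst)) (fun x => x) false with
    | nil =>
      rw [PySem.List.sorted_eq_nil_iff] at hS
      rw [hS] at hk0d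
      exact absurd hk0d (List.not_mem_nil)
    | cons h tl =>
      have hhm : h ∈ ((k0, v0) :: t).map Prod.fst := by
        have : h ∈ PySem.List.sorted (PySem.List.dedup (((k0, v0) :: t).map Prod.fst)) (fun x => x) false := by
          rw [hS]; simp
        rw [PySem.List.mem_sorted] at this
        exact (PySem.List.mem_dedup _ _).mp this
      have hhp : (pvLookup ((k0, v0) :: t) h).isSome = true := (lookup_isSome_iff _ _).mpr hhm
      obtain ⟨vh, hvh⟩ := Option.isSome_iff_exists.mp hhp
      refine ⟨h, ?_, hhm, ?_⟩
      · show pickPhase2 ((k0, v0) :: t) (h :: tl) = pvLookup ((k0, v0) :: t) h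
        simp [pickPhase2, hvh]
      · intro k hk hc
        rcases hc with hlt | ⟨_, hs⟩
        · rw [hrank k hk, hrank h hhm] at hlt
          omega
        · have hkd : k ∈ PySem.List.dedup (((k0, v0) :: t).map Prod.fst) :=
            (PySem.List.mem_dedup _ _).mpr hk
          have := PySem.List.key_head_sorted_le _ _ hS k hkd
          exact absurd hs (not_lt.mpr this)

-- ===== VERDICT (by name: the statement is the Claim_ definition above) =====
theorem pick_texture_spec : Claim_equal_pick_texture := by
  intro textures _
  unfold Spec_pick_texture
  match textures with
  | [] => rfl
  | (k0, v0) :: t =>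
    obtain ⟨m, hA, hm, hmin⟩ := A_min k0 v0 t
    have hb := best_lookup t k0 v0
    have hbm := best_mem t k0 v0
    have hbmin := best_min t k0 v0
    have hmb : m = (bestFrom k0 v0 t).1 := by
      by_contra hne
      rcases keyLt_total hne with h | h
      · exact hbmin m (by simpa using hm) h
      · exact hmin _ (by simpa using hbm) h
    rw [alt_eq, hA, hmb, hb]
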